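-- pv_equiv track=rewrite | github.com/eliranwong/UniqueBible | uniquebible/gui/LibraryCatalogDialog.py | getCatalogItems
-- ===== SOURCE A (Python) =====
-- def getCatalogItems(catalog):
--     data = {}
--     pdfCount = 0
--     mp3Count = 0
--     mp4Count = 0
--     bookCount = 0
--     docxCount = 0
--     commCount = 0
--     lexCount = 0
--     devotionalCount = 0
--     for filename, type, directory, file, description, repo, installDirectory, sha in catalog:
--         id = "UNKNOWN"
--         if type == "PDF":
--             pdfCount += 1
--             id = "{0}-{1}".format(type, pdfCount)
--         elif type == "MP3":
--             mp3Count += 1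
--             id = "{0}-{1}".format(type, mp3Count)
--         elif type == "MP4":
--             mp4Count += 1
--             id = "{0}-{1}".format(type, mp4Count)
--         elif type == "BOOK":
--             bookCount += 1
--             id = "{0}-{1}".format(type, bookCount)
--         elif type == "DOCX":
--             docxCount += 1
--             id = "{0}-{1}".format(type, docxCount)
--         elif type == "COMM":
--             commCount += 1
--             id = "{0}-{1}".format(type, commCount)
--         elif type == "LEX":
--             lexCount += 1
--             id = "{0}-{1}".format(type, lexCount)
--         elif type == "DEVOTIONAL":
--             devotionalCount += 1
--             id = "{0}-{1}".format(type, devotionalCount)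
--         data[id] = [id, filename, type, directory, file, description, repo, installDirectory, sha]
--     return data
-- ===== SOURCE B (Python) =====
-- VALID_TYPES = ("PDF", "MP3", "MP4", "BOOK", "DOCX", "COMM", "LEX", "DEVOTIONAL")
--
-- def getCatalogItems(catalog):
--     # staged: first compute the id of every row by counting same-type rows in
--     # the prefix, then build the dict from the precomputed id list in one zip
--     rows = list(catalog)
--     types = [row[1] for row in rows]
--     ids = ["{0}-{1}".format(t, types[: i + 1].count(t)) if t in VALID_TYPES else "UNKNOWN"
--            for i, t in enumerate(types)]
--     data = {}
--     for id, (filename, type, directory, file, description, repo, installDirectory, sha) in zip(ids, rows):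
--         data[id] = [id, filename, type, directory, file, description, repo, installDirectory, sha]
--     return data
-- ===== Notes on version B (the rewrite author's own statement) =====
-- stated objective: alternative
-- what changed: Replaces A's single stateful pass with eight running counters by a staged pipeline: first derive each row's id from a prefix count of same-type rows (no mutable counters at all), then build the dict from the precomputed id list; trades A's O(n) for O(n^2) prefix counting in exchange for a stateless, data-derived id computation.
import Mathlib
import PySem

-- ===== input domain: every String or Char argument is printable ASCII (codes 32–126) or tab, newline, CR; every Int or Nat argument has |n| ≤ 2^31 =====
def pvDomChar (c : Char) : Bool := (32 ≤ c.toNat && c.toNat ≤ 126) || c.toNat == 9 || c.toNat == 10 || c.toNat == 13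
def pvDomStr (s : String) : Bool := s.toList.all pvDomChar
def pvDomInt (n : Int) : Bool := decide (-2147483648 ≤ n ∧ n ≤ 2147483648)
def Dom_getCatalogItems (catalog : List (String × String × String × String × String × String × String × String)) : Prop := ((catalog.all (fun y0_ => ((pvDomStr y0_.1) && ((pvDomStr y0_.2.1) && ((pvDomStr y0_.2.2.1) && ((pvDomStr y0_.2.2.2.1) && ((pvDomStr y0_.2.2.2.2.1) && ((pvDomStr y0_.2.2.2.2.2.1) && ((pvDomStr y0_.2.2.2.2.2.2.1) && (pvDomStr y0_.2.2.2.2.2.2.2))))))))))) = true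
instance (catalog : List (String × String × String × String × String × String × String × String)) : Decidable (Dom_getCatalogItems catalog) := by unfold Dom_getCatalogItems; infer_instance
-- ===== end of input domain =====

-- B replaces A's single stateful pass (eight running counters + if/elif ladder) by a
-- staged pipeline: each row's id is derived from a prefix count of same-type rows, then
-- the dict is built from the precomputed id list (objective: alternative, stateless ids).

-- ===== PORT A =====
def getCatalogItems (catalog : List (String × String × String × String × String × String × String × String)) : List (String × List String) :=
  (catalog.foldl
    (fun (st : PySem.Dict String (List String) × Int × Int × Int × Int × Int × Int × Int × Int) row =>
      let (data, pdfCount, mp3Count, mp4Count, bookCount, docxCount, commCount, lexCount, devotionalCount) := st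
      let (filename, type, directory, file, description, repo, installDirectory, sha) := row
      if type = "PDF" then
        let pdfCount := pdfCount + 1
        let id := type ++ "-" ++ PySem.Int.toStr pdfCount
        (data.insert id [id, filename, type, directory, file, description, repo, installDirectory, sha],
         pdfCount, mp3Count, mp4Count, bookCount, docxCount, commCount, lexCount, devotionalCount)
      else if type = "MP3" then
        let mp3Count := mp3Count + 1
        let id := type ++ "-" ++ PySem.Int.toStr mp3Count
        (data.insert id [id, filename, type, directory, file, description, repo, installDirectory, sha],
         pdfCount, mp3Count, mp4Count, bookCount, docxCount, commCount, lexCount, devotionalCount)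
      else if type = "MP4" then
        let mp4Count := mp4Count + 1
        let id := type ++ "-" ++ PySem.Int.toStr mp4Count
        (data.insert id [id, filename, type, directory, file, description, repo, installDirectory, sha],
         pdfCount, mp3Count, mp4Count, bookCount, docxCount, commCount, lexCount, devotionalCount)
      else if type = "BOOK" then
        let bookCount := bookCount + 1
        let id := type ++ "-" ++ PySem.Int.toStr bookCount
        (data.insert id [id, filename, type, directory, file, description, repo, installDirectory, sha],
         pdfCount, mp3Count, mp4Count, bookCount, docxCount, commCount, lexCount, devotionalCount)
      else if type = "DOCX" then
        let docxCount := docxCount + 1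
        let id := type ++ "-" ++ PySem.Int.toStr docxCount
        (data.insert id [id, filename, type, directory, file, description, repo, installDirectory, sha],
         pdfCount, mp3Count, mp4Count, bookCount, docxCount, commCount, lexCount, devotionalCount)
      else if type = "COMM" then
        let commCount := commCount + 1
        let id := type ++ "-" ++ PySem.Int.toStr commCount
        (data.insert id [id, filename, type, directory, file, description, repo, installDirectory, sha],
         pdfCount, mp3Count, mp4Count, bookCount, docxCount, commCount, lexCount, devotionalCount)
      else if type = "LEX" then
        let lexCount := lexCount + 1
        let id := type ++ "-" ++ PySem.Int.toStr lexCount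
        (data.insert id [id, filename, type, directory, file, description, repo, installDirectory, sha],
         pdfCount, mp3Count, mp4Count, bookCount, docxCount, commCount, lexCount, devotionalCount)
      else if type = "DEVOTIONAL" then
        let devotionalCount := devotionalCount + 1
        let id := type ++ "-" ++ PySem.Int.toStr devotionalCount
        (data.insert id [id, filename, type, directory, file, description, repo, installDirectory, sha],
         pdfCount, mp3Count, mp4Count, bookCount, docxCount, commCount, lexCount, devotionalCount)
      else
        let id := "UNKNOWN"
        (data.insert id [id, filename, type, directory, file, description, repo, installDirectory, sha],
         pdfCount, mp3Count, mp4Count, bookCount, docxCount, commCount, lexCount, devotionalCount))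
    (PySem.Dict.empty, 0, 0, 0, 0, 0, 0, 0, 0)).1.items

-- ===== PORT B =====
def validTypes : List String := ["PDF", "MP3", "MP4", "BOOK", "DOCX", "COMM", "LEX", "DEVOTIONAL"]

def getCatalogItems_alt (catalog : List (String × String × String × String × String × String × String × String)) : List (String × List String) :=
  let types := catalog.map (fun row => row.2.1)
  let ids := (PySem.List.enumerate types).map (fun p =>
    if validTypes.contains p.2 then
      p.2 ++ "-" ++ PySem.Int.toStr ((PySem.List.count (PySem.List.slice types none (some (p.1 + 1))) p.2 : Int))
    else "UNKNOWN")
  ((List.zip ids catalog).foldl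
    (fun (data : PySem.Dict String (List String)) pr =>
      let (id, row) := pr
      let (filename, type, directory, file, description, repo, installDirectory, sha) := row
      data.insert id [id, filename, type, directory, file, description, repo, installDirectory, sha])
    PySem.Dict.empty).items

-- ===== PRECONDITION & SPEC =====
def Spec_getCatalogItems (catalog : List (String × String × String × String × String × String × String × String)) (out : List (String × List String)) : Prop := out = getCatalogItems_alt catalog
instance (catalog : List (String × String × String × String × String × String × String × String)) (out : List (String × List String)) : Decidable (Spec_getCatalogItems catalog out) := by unfold Spec_getCatalogItems; infer_instance

-- ===== CLAIM (what is proved, stated in full; the proofs are below) =====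
def Claim_equal_getCatalogItems : Prop := ∀ (catalog : List (String × String × String × String × String × String × String × String)), Dom_getCatalogItems catalog → Spec_getCatalogItems catalog (getCatalogItems catalog)

-- ===== LEMMAS AND PROOFS =====

-- canonical id list: id of each type string, given the list P of earlier type strings
def gids (P : List String) : List String → List String
  | [] => []
  | t :: ts =>
    (if validTypes.contains t then t ++ "-" ++ PySem.Int.toStr ((P.count t : Int) + 1) else "UNKNOWN")
      :: gids (P ++ [t]) ts

-- B's enumerate/slice/count id list is the canonical one
theorem ids_eq_gids (ts : List String) :
    ∀ (rest P : List String), P ++ rest = ts →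
    ((PySem.List.enumerate rest (P.length : Int)).map (fun p =>
      if validTypes.contains p.2 then
        p.2 ++ "-" ++ PySem.Int.toStr ((PySem.List.count (PySem.List.slice ts none (some (p.1 + 1))) p.2 : Int))
      else "UNKNOWN")) = gids P rest := by
  intro rest
  induction rest with
  | nil => intro P _; simp [PySem.List.enumerate_nil, gids]
  | cons t ts' ih =>
    intro P hfull
    rw [PySem.List.enumerate_cons, List.map_cons, gids]
    have hcast : ((P.length : Int) + 1) = ((P.length + 1 : Nat) : Int) := by push_cast; ring
    have htake : PySem.List.slice ts none (some ((P.length : Int) + 1)) = P ++ [t] := by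
      rw [hcast, PySem.List.slice_to_natCast, ← hfull]
      rw [show P.length + 1 = P.length + 1 from rfl]
      rw [List.take_append]
      simp
    refine congrArg₂ List.cons ?_ ?_
    · simp only [htake, PySem.List.count_eq]
      by_cases hv : validTypes.contains t = true
      · rw [if_pos hv, if_pos hv]
        refine congrArg (fun z => t ++ "-" ++ PySem.Int.toStr z) ?_
        push_cast [List.count_append]
        simp
      · rw [if_neg hv, if_neg hv]
    · have hlen : ((P.length : Int) + 1) = (((P ++ [t]).length : Nat) : Int) := by
        simp
      rw [hlen]
      exact ih (P ++ [t]) (by simpa using hfull)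

-- A's stateful fold equals the fold over rows zipped with the canonical id list
theorem afold_eq_gids (rest : List (String × String × String × String × String × String × String × String)) :
    ∀ (data : PySem.Dict String (List String)) (p m3 m4 b dx c l dv : Int) (P : List String),
    p = (P.count "PDF" : Int) → m3 = (P.count "MP3" : Int) → m4 = (P.count "MP4" : Int) →
    b = (P.count "BOOK" : Int) → dx = (P.count "DOCX" : Int) → c = (P.count "COMM" : Int) →
    l = (P.count "LEX" : Int) → dv = (P.count "DEVOTIONAL" : Int) →
    (rest.foldl
      (fun (st : PySem.Dict String (List String) × Int × Int × Int × Int × Int × Int × Int × Int) row =>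
        let (data, pdfCount, mp3Count, mp4Count, bookCount, docxCount, commCount, lexCount, devotionalCount) := st
        let (filename, type, directory, file, description, repo, installDirectory, sha) := row
        if type = "PDF" then
          let pdfCount := pdfCount + 1
          let id := type ++ "-" ++ PySem.Int.toStr pdfCount
          (data.insert id [id, filename, type, directory, file, description, repo, installDirectory, sha],
           pdfCount, mp3Count, mp4Count, bookCount, docxCount, commCount, lexCount, devotionalCount)
        else if type = "MP3" then
          let mp3Count := mp3Count + 1
          let id := type ++ "-" ++ PySem.Int.toStr mp3Count
          (data.insert id [id, filename, type, directory, file, description, repo, installDirectory, sha],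
           pdfCount, mp3Count, mp4Count, bookCount, docxCount, commCount, lexCount, devotionalCount)
        else if type = "MP4" then
          let mp4Count := mp4Count + 1
          let id := type ++ "-" ++ PySem.Int.toStr mp4Count
          (data.insert id [id, filename, type, directory, file, description, repo, installDirectory, sha],
           pdfCount, mp3Count, mp4Count, bookCount, docxCount, commCount, lexCount, devotionalCount)
        else if type = "BOOK" then
          let bookCount := bookCount + 1
          let id := type ++ "-" ++ PySem.Int.toStr bookCount
          (data.insert id [id, filename, type, directory, file, description, repo, installDirectory, sha],
           pdfCount, mp3Count, mp4Count, bookCount, docxCount, commCount, lexCount, devotionalCount)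
        else if type = "DOCX" then
          let docxCount := docxCount + 1
          let id := type ++ "-" ++ PySem.Int.toStr docxCount
          (data.insert id [id, filename, type, directory, file, description, repo, installDirectory, sha],
           pdfCount, mp3Count, mp4Count, bookCount, docxCount, commCount, lexCount, devotionalCount)
        else if type = "COMM" then
          let commCount := commCount + 1
          let id := type ++ "-" ++ PySem.Int.toStr commCount
          (data.insert id [id, filename, type, directory, file, description, repo, installDirectory, sha],
           pdfCount, mp3Count, mp4Count, bookCount, docxCount, commCount, lexCount, devotionalCount)
        else if type = "LEX" then
          let lexCount := lexCount + 1
          let id := type ++ "-" ++ PySem.Int.toStr lexCount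
          (data.insert id [id, filename, type, directory, file, description, repo, installDirectory, sha],
           pdfCount, mp3Count, mp4Count, bookCount, docxCount, commCount, lexCount, devotionalCount)
        else if type = "DEVOTIONAL" then
          let devotionalCount := devotionalCount + 1
          let id := type ++ "-" ++ PySem.Int.toStr devotionalCount
          (data.insert id [id, filename, type, directory, file, description, repo, installDirectory, sha],
           pdfCount, mp3Count, mp4Count, bookCount, docxCount, commCount, lexCount, devotionalCount)
        else
          let id := "UNKNOWN"
          (data.insert id [id, filename, type, directory, file, description, repo, installDirectory, sha],
           pdfCount, mp3Count, mp4Count, bookCount, docxCount, commCount, lexCount, devotionalCount))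
      (data, p, m3, m4, b, dx, c, l, dv)).1 =
    (List.zip (gids P (rest.map (fun row => row.2.1))) rest).foldl
      (fun (data : PySem.Dict String (List String)) pr =>
        let (id, row) := pr
        let (filename, type, directory, file, description, repo, installDirectory, sha) := row
        data.insert id [id, filename, type, directory, file, description, repo, installDirectory, sha])
      data := by
  induction rest with
  | nil => intro data p m3 m4 b dx c l dv P _ _ _ _ _ _ _ _; rfl
  | cons row rest' ih =>
    intro data p m3 m4 b dx c l dv P h1 h2 h3 h4 h5 h6 h7 h8
    obtain ⟨filename, t, directory, file, description, repo, installDirectory, sha⟩ := row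
    subst h1 h2 h3 h4 h5 h6 h7 h8
    rw [List.map_cons, gids, List.foldl_cons]
    by_cases e1 : t = "PDF"
    · subst e1
      simp only [String.reduceEq, reduceIte, show validTypes.contains "PDF" = true from rfl]
      rw [List.zip_cons_cons, List.foldl_cons]
      exact ih _ _ _ _ _ _ _ _ _ (P ++ ["PDF"])
        (by simp [List.count_append]) (by simp [List.count_append])
        (by simp [List.count_append]) (by simp [List.count_append])
        (by simp [List.count_append]) (by simp [List.count_append])
        (by simp [List.count_append]) (by simp [List.count_append])
    · by_cases e2 : t = "MP3"
      · subst e2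
        simp only [String.reduceEq, reduceIte, show validTypes.contains "MP3" = true from rfl]
        rw [List.zip_cons_cons, List.foldl_cons]
        exact ih _ _ _ _ _ _ _ _ _ (P ++ ["MP3"])
          (by simp [List.count_append]) (by simp [List.count_append])
          (by simp [List.count_append]) (by simp [List.count_append])
          (by simp [List.count_append]) (by simp [List.count_append])
          (by simp [List.count_append]) (by simp [List.count_append])
      · by_cases e3 : t = "MP4"
        · subst e3
          simp only [String.reduceEq, reduceIte, show validTypes.contains "MP4" = true from rfl]
          rw [List.zip_cons_cons, List.foldl_cons]
          exact ih _ _ _ _ _ _ _ _ _ (P ++ ["MP4"])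
            (by simp [List.count_append]) (by simp [List.count_append])
            (by simp [List.count_append]) (by simp [List.count_append])
            (by simp [List.count_append]) (by simp [List.count_append])
            (by simp [List.count_append]) (by simp [List.count_append])
        · by_cases e4 : t = "BOOK"
          · subst e4
            simp only [String.reduceEq, reduceIte, show validTypes.contains "BOOK" = true from rfl]
            rw [List.zip_cons_cons, List.foldl_cons]
            exact ih _ _ _ _ _ _ _ _ _ (P ++ ["BOOK"])
              (by simp [List.count_append]) (by simp [List.count_append])
              (by simp [List.count_append]) (by simp [List.count_append])
              (by simp [List.count_append]) (by simp [List.count_append])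
              (by simp [List.count_append]) (by simp [List.count_append])
          · by_cases e5 : t = "DOCX"
            · subst e5
              simp only [String.reduceEq, reduceIte, show validTypes.contains "DOCX" = true from rfl]
              rw [List.zip_cons_cons, List.foldl_cons]
              exact ih _ _ _ _ _ _ _ _ _ (P ++ ["DOCX"])
                (by simp [List.count_append]) (by simp [List.count_append])
                (by simp [List.count_append]) (by simp [List.count_append])
                (by simp [List.count_append]) (by simp [List.count_append])
                (by simp [List.count_append]) (by simp [List.count_append])
            · by_cases e6 : t = "COMM"
              · subst e6
                simp only [String.reduceEq, reduceIte, show validTypes.contains "COMM" = true from rfl]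
                rw [List.zip_cons_cons, List.foldl_cons]
                exact ih _ _ _ _ _ _ _ _ _ (P ++ ["COMM"])
                  (by simp [List.count_append]) (by simp [List.count_append])
                  (by simp [List.count_append]) (by simp [List.count_append])
                  (by simp [List.count_append]) (by simp [List.count_append])
                  (by simp [List.count_append]) (by simp [List.count_append])
              · by_cases e7 : t = "LEX"
                · subst e7
                  simp only [String.reduceEq, reduceIte, show validTypes.contains "LEX" = true from rfl]
                  rw [List.zip_cons_cons, List.foldl_cons]
                  exact ih _ _ _ _ _ _ _ _ _ (P ++ ["LEX"])
                    (by simp [List.count_append]) (by simp [List.count_append])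
                    (by simp [List.count_append]) (by simp [List.count_append])
                    (by simp [List.count_append]) (by simp [List.count_append])
                    (by simp [List.count_append]) (by simp [List.count_append])
                · by_cases e8 : t = "DEVOTIONAL"
                  · subst e8
                    simp only [String.reduceEq, reduceIte, show validTypes.contains "DEVOTIONAL" = true from rfl]
                    rw [List.zip_cons_cons, List.foldl_cons]
                    exact ih _ _ _ _ _ _ _ _ _ (P ++ ["DEVOTIONAL"])
                      (by simp [List.count_append]) (by simp [List.count_append])
                      (by simp [List.count_append]) (by simp [List.count_append])
                      (by simp [List.count_append]) (by simp [List.count_append])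
                      (by simp [List.count_append]) (by simp [List.count_append])
                  · have hv : validTypes.contains t = false := by
                      simp [validTypes, e1, e2, e3, e4, e5, e6, e7, e8]
                    simp only [e1, e2, e3, e4, e5, e6, e7, e8, hv, Bool.false_eq_true, if_false]
                    rw [List.zip_cons_cons, List.foldl_cons]
                    exact ih _ _ _ _ _ _ _ _ _ (P ++ [t])
                      (by simp [List.count_append, e1])
                      (by simp [List.count_append, e2])
                      (by simp [List.count_append, e3])
                      (by simp [List.count_append, e4])
                      (by simp [List.count_append, e5])
                      (by simp [List.count_append, e6])
                      (by simp [List.count_append, e7])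
                      (by simp [List.count_append, e8])

-- ===== VERDICT (by name: the statement is the Claim_ definition above) =====
theorem getCatalogItems_spec : Claim_equal_getCatalogItems := by
  intro catalog _
  simp only [Spec_getCatalogItems, getCatalogItems, getCatalogItems_alt]
  have hids : ((PySem.List.enumerate (catalog.map (fun row => row.2.1)) 0).map (fun p =>
      if validTypes.contains p.2 then
        p.2 ++ "-" ++ PySem.Int.toStr ((PySem.List.count (PySem.List.slice (catalog.map (fun row => row.2.1)) none (some (p.1 + 1))) p.2 : Int))
      else "UNKNOWN")) = gids [] (catalog.map (fun row => row.2.1)) := by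
    have h := ids_eq_gids (catalog.map (fun row => row.2.1)) (catalog.map (fun row => row.2.1)) [] rfl
    simpa using h
  rw [hids]
  exact congrArg PySem.Dict.items
    (afold_eq_gids catalog PySem.Dict.empty 0 0 0 0 0 0 0 0 []
      (by simp) (by simp) (by simp) (by simp) (by simp) (by simp) (by simp) (by simp))
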